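-- pv_equiv track=rewrite | github.com/MrBrantCode/unitest_baseline | mut_generate/mist_train_cf/cf_87910/solution.py | filter_keywords
-- ===== SOURCE A (Python) =====
-- def filter_keywords(text, keywords):
--     lowercase_keywords = set(keyword.lower() for keyword in keywords)
--     words = text.split()
--     filtered_words = []
--
--     for word in words:
--         lowercase_word = word.lower()
--         should_filter = any(keyword in lowercase_word for keyword in lowercase_keywords)
--
--         if not should_filter:
--             filtered_words.append(word)
--
--     filtered_text = ' '.join(filtered_words)
--     return filtered_text
-- ===== SOURCE B (Python) =====
-- def filter_keywords(text, keywords):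
--     words = text.split()
--     lowered_words = [word.lower() for word in words]
--     hit = [False] * len(words)
--     for k in {keyword.lower() for keyword in keywords}:
--         hit = [h or k in lw for h, lw in zip(hit, lowered_words)]
--     return ' '.join(w for w, h in zip(words, hit) if not h)
-- ===== Notes on version B (the rewrite author's own statement) =====
-- stated objective: alternative
-- what changed: Loop interchange: instead of scanning all keywords per word inside a word loop with an accumulator list, B iterates keywords on the outside, accumulating a hit bitmap over the lowered words, and finally joins the unmarked words.
import Mathlib
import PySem

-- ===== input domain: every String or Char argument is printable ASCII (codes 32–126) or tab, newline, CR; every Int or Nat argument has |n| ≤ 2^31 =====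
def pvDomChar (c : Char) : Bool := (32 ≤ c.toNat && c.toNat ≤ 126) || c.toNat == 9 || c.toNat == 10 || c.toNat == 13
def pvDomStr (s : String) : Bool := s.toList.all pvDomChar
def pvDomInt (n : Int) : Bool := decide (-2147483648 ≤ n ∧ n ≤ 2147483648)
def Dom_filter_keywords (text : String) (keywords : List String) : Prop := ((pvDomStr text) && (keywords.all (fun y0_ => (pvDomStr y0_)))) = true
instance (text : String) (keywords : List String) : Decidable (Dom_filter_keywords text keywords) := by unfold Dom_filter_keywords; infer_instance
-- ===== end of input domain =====

-- B interchanges the loops: keywords on the outside, accumulating a hit bitmap over the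
-- lowered words, then joins the unmarked words; objective: alternative (same cost, different traversal).

-- ===== PORT A =====
def filter_keywords (text : String) (keywords : List String) : String :=
  let lowercase_keywords := PySem.Set.ofList (keywords.map (fun keyword => PySem.Str.lower keyword))
  let words := PySem.Str.split₀ text
  let filtered_words := words.foldl (fun filtered_words word =>
    let lowercase_word := PySem.Str.lower word
    let should_filter := lowercase_keywords.any (fun keyword => PySem.Str.isIn keyword lowercase_word)
    if !should_filter then filtered_words ++ [word] else filtered_words) []
  PySem.Str.join " " filtered_words

-- ===== PORT B =====
def filter_keywords_alt (text : String) (keywords : List String) : String :=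
  let words := PySem.Str.split₀ text
  let lowered_words := words.map (fun word => PySem.Str.lower word)
  let hit0 := List.replicate words.length false
  let hit := (PySem.Set.ofList (keywords.map (fun keyword => PySem.Str.lower keyword))).foldl
    (fun hit k => (hit.zip lowered_words).map (fun p => p.1 || PySem.Str.isIn k p.2)) hit0
  PySem.Str.join " " (((words.zip hit).filter (fun p => !p.2)).map (fun p => p.1))

-- ===== PRECONDITION & SPEC =====
def Spec_filter_keywords (text : String) (keywords : List String) (out : String) : Prop := out = filter_keywords_alt text keywords
instance (text : String) (keywords : List String) (out : String) : Decidable (Spec_filter_keywords text keywords out) := by unfold Spec_filter_keywords; infer_instance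

-- ===== CLAIM (what is proved, stated in full; the proofs are below) =====
def Claim_equal_filter_keywords : Prop := ∀ (text : String) (keywords : List String), Dom_filter_keywords text keywords → Spec_filter_keywords text keywords (filter_keywords text keywords)

-- ===== LEMMAS AND PROOFS =====

-- dropping the right components of a length-bounded zip gives back the left list
theorem zip_map_fst : ∀ (hit : List Bool) (low : List String),
    hit.length ≤ low.length → (hit.zip low).map (fun p => p.1) = hit := by
  intro hit
  induction hit with
  | nil => intro low _; simp
  | cons h t ih =>
    intro low hlen
    cases low with
    | nil => simp at hlen
    | cons lw low => simp only [List.zip_cons_cons, List.map_cons]; rw [ih low (by simpa using hlen)]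

-- zip-map over the same right list composes pointwise
theorem zip_map_zip (f g : Bool → String → Bool) :
    ∀ (a : List Bool) (b : List String),
      (((a.zip b).map (fun p => f p.1 p.2)).zip b).map (fun p => g p.1 p.2)
        = (a.zip b).map (fun p => g (f p.1 p.2) p.2) := by
  intro a
  induction a with
  | nil => intro b; simp
  | cons x a ih =>
    intro b
    cases b with
    | nil => simp
    | cons y b => simp [ih]

-- one bitmap pass per keyword accumulates the disjunction over all keywords
theorem fold_hit : ∀ (keys low : List String) (hit : List Bool),
    hit.length ≤ low.length →
      keys.foldl (fun hit k => (hit.zip low).map (fun p => p.1 || PySem.Str.isIn k p.2)) hit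
        = (hit.zip low).map (fun p => p.1 || keys.any (fun k => PySem.Str.isIn k p.2)) := by
  intro keys
  induction keys with
  | nil =>
    intro low hit hlen
    simp only [List.foldl_nil, List.any_nil, Bool.or_false]
    exact (zip_map_fst hit low hlen).symm
  | cons k keys ih =>
    intro low hit hlen
    rw [List.foldl_cons, ih low _ (by simp [List.length_zip]),
      zip_map_zip (fun h lw => h || PySem.Str.isIn k lw)
        (fun h lw => h || List.any keys (fun k => PySem.Str.isIn k lw))]
    apply List.map_congr_left
    intro p _
    simp [Bool.or_assoc]

-- the initial all-false bitmap zipped with the lowered words is a per-word map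
theorem init_hit (P : String → Bool) :
    ∀ (words : List String),
      ((List.replicate words.length false).zip (words.map (fun w => PySem.Str.lower w))).map
          (fun p => p.1 || P p.2)
        = words.map (fun w => P (PySem.Str.lower w)) := by
  intro words
  induction words with
  | nil => simp
  | cons w words ih => simp only [List.length_cons, List.replicate, List.map_cons,
      List.zip_cons_cons, Bool.false_or]; rw [ih]

-- selecting the words whose bitmap entry is false is a filter
theorem zip_filter (q : String → Bool) :
    ∀ (words : List String),
      ((words.zip (words.map q)).filter (fun p => !p.2)).map (fun p => p.1)
        = words.filter (fun w => !q w) := by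
  intro words
  induction words with
  | nil => simp
  | cons w words ih =>
    by_cases h : q w = true <;> simp [List.filter, h, ih]

-- ===== VERDICT (by name: the statement is the Claim_ definition above) =====
theorem filter_keywords_spec : Claim_equal_filter_keywords := by
  intro text keywords _
  unfold Spec_filter_keywords filter_keywords filter_keywords_alt
  have hA := PySem.List.foldl_append_if
    (fun word => !(PySem.Set.ofList (keywords.map (fun keyword => PySem.Str.lower keyword))).any
        (fun keyword => PySem.Str.isIn keyword (PySem.Str.lower word)))
    (fun word => word) (PySem.Str.split₀ text) []
  simp only [List.map_id'] at hA
  simp only [hA, List.nil_append]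
  rw [fold_hit (PySem.Set.ofList (keywords.map (fun keyword => PySem.Str.lower keyword)))
      ((PySem.Str.split₀ text).map (fun word => PySem.Str.lower word))
      (List.replicate (PySem.Str.split₀ text).length false) (by simp),
    init_hit (fun lw => (PySem.Set.ofList (keywords.map (fun keyword => PySem.Str.lower keyword))).any
      (fun k => PySem.Str.isIn k lw)) (PySem.Str.split₀ text),
    zip_filter (fun w => (PySem.Set.ofList (keywords.map (fun keyword => PySem.Str.lower keyword))).any
      (fun k => PySem.Str.isIn k (PySem.Str.lower w))) (PySem.Str.split₀ text)]
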